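-- pv_equiv track=rewrite | github.com/Algo-Inha/Algo-inha | mang5o/220321/pg-42626-old.py | solution
-- ===== SOURCE A (Python) =====
-- import bisect
--
-- def solution(scoville, K):
--     scoville.sort()  # 오름차순 정렬
--     now_step = 0
--     mix_flag = False
--     while len(scoville) > 1:
--         now_step += 1
--         new_scoville = scoville[0] + scoville[1] * 2
--         del scoville[0]
--         del scoville[0]
--         new_idx = bisect.bisect_left(scoville, new_scoville)
--         scoville.insert(new_idx, new_scoville)
--         if scoville[0] >= K:
--             mix_flag = True
--             break
--     if mix_flag:
--         return now_step
--     else: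
--         return -1
-- ===== SOURCE B (Python) =====
-- # Leftist min-heap re-implementation: O(n log n) instead of A's O(n^2) list
-- # simulation. A mutates `scoville` in place (sort/del/insert); B does not —
-- # equivalence is about the return value. Intended difference: when the list is
-- # non-empty and every element is already >= K, B returns 0 (no mixing needed)
-- # while A mixes at least once.
--
-- def _merge(a, b):
--     # leftist heaps as tuples (value, rank, left, right); None = empty
--     if a is None:
--         return b
--     if b is None:
--         return a
--     if b[0] < a[0]:
--         a, b = b, a
--     left = a[2]
--     right = _merge(a[3], b)
--     lr = left[1] if left is not None else 0
--     rr = right[1] if right is not None else 0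
--     if lr >= rr:
--         return (a[0], rr + 1, left, right)
--     return (a[0], lr + 1, right, left)
--
--
-- def solution(scoville, K):
--     heap = None
--     n = 0
--     for x in scoville:
--         heap = _merge((x, 1, None, None), heap)
--         n += 1
--     if n > 0 and heap[0] >= K:
--         return 0
--     steps = 0
--     while n > 1:
--         steps += 1
--         a = heap[0]
--         rest = _merge(heap[2], heap[3])
--         b = rest[0]
--         rest = _merge(rest[2], rest[3])
--         heap = _merge(rest, (a + b * 2, 1, None, None))
--         n -= 1
--         if heap[0] >= K:
--             return steps
--     return -1
-- ===== Notes on version B (the rewrite author's own statement) =====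
-- stated objective: faster
-- what changed: Replaces A's quadratic sorted-list simulation (two deletions plus a bisect-insert per step) with a leftist min-heap (pop two minima, push the mix), and checks the already-spicy-enough case up front.
-- intended difference: On non-empty lists whose every element is already >= K, A performs at least one mix and returns a step count >= 1 (or -1), while B returns 0, the intended number of mixes needed when the minimum already meets K. — e.g. on solution([1, 2], 1): A returns 1, B returns 0
import Mathlib
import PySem

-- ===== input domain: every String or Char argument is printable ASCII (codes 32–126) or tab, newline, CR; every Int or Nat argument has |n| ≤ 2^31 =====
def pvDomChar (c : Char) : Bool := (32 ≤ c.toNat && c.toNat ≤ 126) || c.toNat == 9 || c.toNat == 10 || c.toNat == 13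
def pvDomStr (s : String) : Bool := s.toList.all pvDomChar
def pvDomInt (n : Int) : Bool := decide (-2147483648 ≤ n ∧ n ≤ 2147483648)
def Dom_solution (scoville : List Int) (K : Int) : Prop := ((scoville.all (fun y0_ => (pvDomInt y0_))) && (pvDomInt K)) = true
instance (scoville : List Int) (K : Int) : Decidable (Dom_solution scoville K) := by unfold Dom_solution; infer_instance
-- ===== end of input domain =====

-- B replaces A's quadratic sorted-list simulation with a leftist min-heap (pop two
-- minima, push the mix) and returns 0 up front when the minimum already meets K;
-- A mutates `scoville` in place (sort/del/insert), B does not — the equivalence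
-- proved here is about the return value only.

-- ===== PORT A =====
-- A's while-loop: while len(scoville) > 1 mix the two smallest; the sorted list is
-- maintained with del/del/bisect_left/insert.  `s'.headI` is scoville[0] (s' is
-- never empty there, since insert grows t by one element).
-- `fuel` is only a structural totality guard: it equals the list's length at every call
def solutionLoopA : Nat → List Int → Int → Int → Int
  | fuel + 1, a :: b :: t, K, now_step =>
      let new_scoville := a + b * 2
      let s' := PySem.List.insert t ((PySem.List.bisectLeft t new_scoville : Nat) : Int) new_scoville
      if s'.headI ≥ K then now_step + 1
      else solutionLoopA fuel s' K (now_step + 1)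
  | _, _, _, _ => -1

def solution (scoville : List Int) (K : Int) : Int :=
  solutionLoopA (PySem.List.sorted scoville (fun x => x) false).length
    (PySem.List.sorted scoville (fun x => x) false) K 0

-- ===== PORT B =====
-- Leftist min-heap, a tuple (value, rank, left, right) in Source B; LHeap.nil = None.
inductive LHeap where
  | nil : LHeap
  | node : Int → Int → LHeap → LHeap → LHeap
deriving DecidableEq, Repr

def LHeap.size : LHeap → Nat
  | .nil => 0
  | .node _ _ l r => 1 + l.size + r.size

-- `left[1] if left is not None else 0`
def LHeap.rankD : LHeap → Int
  | .nil => 0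
  | .node _ rk _ _ => rk

-- heap[0]; in Source B only evaluated behind a non-emptiness guard
def LHeap.rootD : LHeap → Int
  | .nil => 0
  | .node v _ _ _ => v

-- heap[2] / heap[3]; in Source B only evaluated on non-empty heaps
def LHeap.childL : LHeap → LHeap
  | .nil => .nil
  | .node _ _ l _ => l

def LHeap.childR : LHeap → LHeap
  | .nil => .nil
  | .node _ _ _ r => r

-- the tail of _merge after the recursive call: rebuild the node, smaller rank right
def LHeap.mergeStep (v : Int) (left rightM : LHeap) : LHeap :=
  if left.rankD ≥ rightM.rankD then .node v (rightM.rankD + 1) left rightM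
  else .node v (left.rankD + 1) rightM left

-- `fuel` is only a structural totality guard: LHeap.merge supplies the nodes' total size
def LHeap.mergeFuel : Nat → LHeap → LHeap → LHeap
  | _, .nil, b => b
  | _, .node va ra la r2a, .nil => .node va ra la r2a
  | fuel + 1, .node va ra la r2a, .node vb rb lb r2b =>
      if vb < va then
        LHeap.mergeStep vb lb (LHeap.mergeFuel fuel r2b (.node va ra la r2a))
      else
        LHeap.mergeStep va la (LHeap.mergeFuel fuel r2a (.node vb rb lb r2b))
  | 0, a, _ => a

def LHeap.merge (a b : LHeap) : LHeap := LHeap.mergeFuel (a.size + b.size) a b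

-- the while-loop of Source B: pop the two minima, push a + b*2, count the step
-- `fuel` is only a structural totality guard: it equals n (the heap's size) at every call
def solutionLoopB : Nat → LHeap → Int → Int → Int → Int
  | fuel + 1, heap, n, K, steps =>
    if n > 1 then
      let steps' := steps + 1
      let a := heap.rootD
      let rest := LHeap.merge heap.childL heap.childR
      let b := rest.rootD
      let rest2 := LHeap.merge rest.childL rest.childR
      let heap' := LHeap.merge rest2 (.node (a + b * 2) 1 .nil .nil)
      if heap'.rootD ≥ K then steps' else solutionLoopB fuel heap' (n - 1) K steps'
    else -1
  | 0, _, _, _, _ => -1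

def solution_alt (scoville : List Int) (K : Int) : Int :=
  let p := scoville.foldl
    (fun (p : LHeap × Int) x => (LHeap.merge (.node x 1 .nil .nil) p.1, p.2 + 1))
    (.nil, 0)
  if p.2 > 0 ∧ p.1.rootD ≥ K then 0
  else solutionLoopB p.2.toNat p.1 p.2 K 0

-- ===== PRECONDITION & SPEC =====
-- On non-empty lists whose every element is already >= K, A performs at least one mix
-- and returns a step count >= 1 (or -1), while B returns 0, the intended number of
-- mixes needed when the minimum already meets K.
def D_solution (scoville : List Int) (K : Int) : Prop :=
  scoville ≠ [] ∧ ∀ x ∈ scoville, K ≤ x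
instance (scoville : List Int) (K : Int) : Decidable (D_solution scoville K) := by
  unfold D_solution; infer_instance

def Spec_solution (scoville : List Int) (K : Int) (out : Int) : Prop :=
  ¬ D_solution scoville K → out = solution_alt scoville K
instance (scoville : List Int) (K : Int) (out : Int) : Decidable (Spec_solution scoville K out) := by
  unfold Spec_solution; infer_instance

def pvDiffWitness_solution : List Int × Int := ([1, 2], 1)
def pvDiffWitnessOut_solution : Int × Int := (1, 0)

-- ===== CLAIM (what is proved, stated in full; the proofs are below) =====
def Claim_unchanged_solution : Prop := ∀ (scoville : List Int) (K : Int), Dom_solution scoville K → Spec_solution scoville K (solution scoville K)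
def Claim_changed_solution : Prop := Dom_solution (pvDiffWitness_solution.1) (pvDiffWitness_solution.2) ∧ D_solution (pvDiffWitness_solution.1) (pvDiffWitness_solution.2) ∧ solution (pvDiffWitness_solution.1) (pvDiffWitness_solution.2) = pvDiffWitnessOut_solution.1 ∧ solution_alt (pvDiffWitness_solution.1) (pvDiffWitness_solution.2) = pvDiffWitnessOut_solution.2 ∧ pvDiffWitnessOut_solution.1 ≠ pvDiffWitnessOut_solution.2
def Claim_exact_solution : Prop := ∀ (scoville : List Int) (K : Int), Dom_solution scoville K → D_solution scoville K → solution scoville K ≠ solution_alt scoville K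

-- ===== LEMMAS AND PROOFS =====

-- multiset of values in a heap
def LHeap.toMul : LHeap → Multiset Int
  | .nil => 0
  | .node v _ l r => v ::ₘ (l.toMul + r.toMul)

-- the min-heap property (ranks are irrelevant to it)
def LHeap.IsHeap : LHeap → Prop
  | .nil => True
  | .node v _ l r => (∀ x ∈ l.toMul, v ≤ x) ∧ (∀ x ∈ r.toMul, v ≤ x) ∧ l.IsHeap ∧ r.IsHeap

theorem mergeStep_toMul (v : Int) (l r : LHeap) :
    (LHeap.mergeStep v l r).toMul = v ::ₘ (l.toMul + r.toMul) := by
  unfold LHeap.mergeStep; split <;> simp [LHeap.toMul, add_comm]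

theorem mergeFuel_toMul : ∀ (fuel : Nat) (a b : LHeap), a.size + b.size ≤ fuel →
    (LHeap.mergeFuel fuel a b).toMul = a.toMul + b.toMul := by
  intro fuel
  induction fuel with
  | zero =>
      intro a b h
      cases a with
      | nil => simp [LHeap.mergeFuel, LHeap.toMul]
      | node va ra la r2a => simp [LHeap.size] at h
  | succ n ihn =>
      intro a b h
      cases a with
      | nil => simp [LHeap.mergeFuel, LHeap.toMul]
      | node va ra la r2a =>
        cases b with
        | nil => simp [LHeap.mergeFuel, LHeap.toMul]
        | node vb rb lb r2b =>
          rw [LHeap.mergeFuel]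
          simp only [LHeap.size] at h
          split
          · rw [mergeStep_toMul, ihn _ _ (by simp [LHeap.size]; omega)]
            simp only [LHeap.toMul, ← Multiset.singleton_add]
            abel
          · rw [mergeStep_toMul, ihn _ _ (by simp [LHeap.size]; omega)]
            simp only [LHeap.toMul, ← Multiset.singleton_add]
            abel

theorem merge_toMul (a b : LHeap) : (LHeap.merge a b).toMul = a.toMul + b.toMul :=
  mergeFuel_toMul _ a b le_rfl

theorem mergeStep_isHeap (v : Int) (l r : LHeap)
    (hl : l.IsHeap) (hr : r.IsHeap)
    (hbl : ∀ x ∈ l.toMul, v ≤ x) (hbr : ∀ x ∈ r.toMul, v ≤ x) :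
    (LHeap.mergeStep v l r).IsHeap := by
  unfold LHeap.mergeStep; split
  · exact ⟨hbl, hbr, hl, hr⟩
  · exact ⟨hbr, hbl, hr, hl⟩

theorem root_le {v rk : Int} {l r : LHeap} (h : (LHeap.node v rk l r).IsHeap) :
    ∀ x ∈ (LHeap.node v rk l r).toMul, v ≤ x := by
  intro x hx
  simp [LHeap.toMul] at hx
  rcases hx with h1 | h2 | h3
  · omega
  · exact h.1 x h2
  · exact h.2.1 x h3

theorem mergeFuel_isHeap : ∀ (fuel : Nat) (a b : LHeap), a.size + b.size ≤ fuel →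
    a.IsHeap → b.IsHeap → (LHeap.mergeFuel fuel a b).IsHeap := by
  intro fuel
  induction fuel with
  | zero =>
      intro a b h ha hb
      cases a with
      | nil => simpa [LHeap.mergeFuel] using hb
      | node va ra la r2a => simp [LHeap.size] at h
  | succ n ihn =>
      intro a b h ha hb
      cases a with
      | nil => simpa [LHeap.mergeFuel] using hb
      | node va ra la r2a =>
        cases b with
        | nil => simpa [LHeap.mergeFuel] using ha
        | node vb rb lb r2b =>
          rw [LHeap.mergeFuel]
          simp only [LHeap.size] at h
          have hle1 : r2b.size + (LHeap.node va ra la r2a).size ≤ n := by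
            simp [LHeap.size]; omega
          have hle2 : r2a.size + (LHeap.node vb rb lb r2b).size ≤ n := by
            simp [LHeap.size]; omega
          have hm1 := mergeFuel_toMul n r2b (LHeap.node va ra la r2a) hle1
          have hm2 := mergeFuel_toMul n r2a (LHeap.node vb rb lb r2b) hle2
          split
          · next hvb =>
            refine mergeStep_isHeap _ _ _ hb.2.2.1 (ihn _ _ hle1 hb.2.2.2 ha) hb.1 ?_
            intro x hx
            rw [hm1] at hx
            rcases Multiset.mem_add.mp hx with hx | hx
            · exact hb.2.1 x hx
            · exact le_trans (le_of_lt hvb) (root_le ha x hx)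
          · next hvb =>
            refine mergeStep_isHeap _ _ _ ha.2.2.1 (ihn _ _ hle2 ha.2.2.2 hb) ha.1 ?_
            intro x hx
            rw [hm2] at hx
            rcases Multiset.mem_add.mp hx with hx | hx
            · exact ha.2.1 x hx
            · exact le_trans (by omega : va ≤ vb) (root_le hb x hx)

theorem merge_isHeap (a b : LHeap) (ha : a.IsHeap) (hb : b.IsHeap) :
    (LHeap.merge a b).IsHeap :=
  mergeFuel_isHeap _ a b le_rfl ha hb

-- head of a ≤-sorted list is a lower bound
theorem sorted_head_le {a : Int} {t : List Int}
    (h : (a :: t).Pairwise (· ≤ ·)) : ∀ x ∈ (a :: t), a ≤ x := by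
  intro x hx
  rcases List.mem_cons.mp hx with rfl | hx
  · exact le_refl x
  · exact (List.pairwise_cons.mp h).1 x hx

-- inserting at bisect_left keeps the list sorted and is a permutation of cons
theorem insert_bisect (t : List Int) (x : Int) (hs : t.Pairwise (· ≤ ·)) :
    (PySem.List.insert t ((PySem.List.bisectLeft t x : Nat) : Int) x).Pairwise (· ≤ ·) ∧
    (PySem.List.insert t ((PySem.List.bisectLeft t x : Nat) : Int) x).Perm (x :: t) := by
  obtain ⟨hk, hlt, hge⟩ := PySem.List.bisectLeft_spec t x hs
  rw [PySem.List.insert_natCast t _ x hk]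
  have htake : ∀ a ∈ t.take (PySem.List.bisectLeft t x), a < x := by
    intro a ha
    obtain ⟨i, hi, hgt⟩ := List.mem_iff_getElem.mp ha
    rw [List.length_take] at hi
    have hlen : i < t.length := by omega
    have hik : i < PySem.List.bisectLeft t x := by omega
    have := hlt i hlen hik
    rw [List.getElem_take] at hgt
    omega
  have hdrop : ∀ b ∈ t.drop (PySem.List.bisectLeft t x), x ≤ b := by
    intro b hb
    obtain ⟨i, hi, hgt⟩ := List.mem_iff_getElem.mp hb
    rw [List.getElem_drop] at hgt
    rw [List.length_drop] at hi
    have hlen : PySem.List.bisectLeft t x + i < t.length := by omega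
    have := hge (PySem.List.bisectLeft t x + i) hlen (by omega)
    omega
  constructor
  · refine List.pairwise_append.mpr ⟨?_, ?_, ?_⟩
    · exact hs.sublist (List.take_sublist ..)
    · refine List.pairwise_cons.mpr ⟨hdrop, hs.sublist (List.drop_sublist ..)⟩
    · intro a ha b hb
      rcases List.mem_cons.mp hb with rfl | hb
      · exact le_of_lt (htake a ha)
      · exact le_trans (le_of_lt (htake a ha)) (hdrop b hb)
  · exact List.perm_middle.trans (by rw [List.take_append_drop])

-- a non-empty heap's root is in its multiset
theorem rootD_mem {hp : LHeap} (h : hp ≠ .nil) : hp.rootD ∈ hp.toMul := by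
  cases hp with
  | nil => exact absurd rfl h
  | node v rk l r => simp [LHeap.rootD, LHeap.toMul]

-- root of a heap holding the same multiset as a sorted list is its head
theorem rootD_eq_head {hp : LHeap} {c : Int} {cs : List Int} (hh : hp.IsHeap)
    (ht : hp.toMul = ((c :: cs : List Int) : Multiset Int))
    (hsorted : (c :: cs).Pairwise (· ≤ ·)) : hp.rootD = c := by
  cases hp with
  | nil => simp [LHeap.toMul] at ht; exact absurd ht.symm (by simp)
  | node v rk l r =>
      have h1 : v ≤ c := root_le hh c (by rw [ht]; simp)
      have h2 : c ≤ v := sorted_head_le hsorted v (by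
        have hv : v ∈ (LHeap.node v rk l r).toMul := by simp [LHeap.toMul]
        rw [ht] at hv; exact Multiset.mem_coe.mp hv)
      simp [LHeap.rootD]; omega

-- the main simulation: A's sorted-list loop equals B's heap loop
theorem sim : ∀ (m : Nat) (s : List Int) (hp : LHeap) (K step : Int),
    s.length = m → s.Pairwise (· ≤ ·) → hp.IsHeap → hp.toMul = (s : Multiset Int) →
    solutionLoopA s.length s K step = solutionLoopB s.length hp (s.length : Int) K step := by
  intro m
  induction m using Nat.strong_induction_on with
  | _ m ih =>
  intro s hp K step hm hs hh ht
  match s with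
  | [] => rfl
  | [a] => rfl
  | a :: b :: t =>
  cases hp with
  | nil => exact absurd ht (by simp [LHeap.toMul]; exact fun h => absurd h.symm (by simp))
  | node v rk l r =>
  have hva : v = a := by
    have := rootD_eq_head hh ht hs; simpa [LHeap.rootD] using this
  subst hva
  have hrest_mul : (LHeap.merge l r).toMul = ((b :: t : List Int) : Multiset Int) := by
    rw [merge_toMul]
    have : v ::ₘ (l.toMul + r.toMul) = v ::ₘ ((b :: t : List Int) : Multiset Int) := by
      simpa [LHeap.toMul] using ht
    exact (Multiset.cons_inj_right v).mp this
  have hrest_heap : (LHeap.merge l r).IsHeap := merge_isHeap l r hh.2.2.1 hh.2.2.2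
  cases hrest : LHeap.merge l r with
  | nil => rw [hrest] at hrest_mul; exact absurd hrest_mul (by simp [LHeap.toMul]; exact fun h => absurd h.symm (by simp))
  | node v2 rk2 l2 r2 =>
  rw [hrest] at hrest_mul hrest_heap
  have hsbt : (b :: t).Pairwise (· ≤ ·) := hs.sublist (by simp)
  have hv2 : v2 = b := by
    have := rootD_eq_head hrest_heap hrest_mul hsbt; simpa [LHeap.rootD] using this
  subst hv2
  have hrest2_mul : (LHeap.merge l2 r2).toMul = (t : Multiset Int) := by
    rw [merge_toMul]
    have : v2 ::ₘ (l2.toMul + r2.toMul) = v2 ::ₘ (t : Multiset Int) := by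
      simpa [LHeap.toMul] using hrest_mul
    exact (Multiset.cons_inj_right v2).mp this
  have hrest2_heap : (LHeap.merge l2 r2).IsHeap :=
    merge_isHeap l2 r2 hrest_heap.2.2.1 hrest_heap.2.2.2
  have hheap' : (LHeap.merge (LHeap.merge l2 r2) (.node (v + v2 * 2) 1 .nil .nil)).IsHeap :=
    merge_isHeap _ _ hrest2_heap (by simp [LHeap.IsHeap, LHeap.toMul])
  have hheap'_mul : (LHeap.merge (LHeap.merge l2 r2) (.node (v + v2 * 2) 1 .nil .nil)).toMul
      = ((v + v2 * 2) ::ₘ (t : Multiset Int)) := by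
    rw [merge_toMul, hrest2_mul]
    simp [LHeap.toMul, ← Multiset.singleton_add]
    abel
  obtain ⟨hs'_sorted, hs'_perm⟩ := insert_bisect t (v + v2 * 2) (hsbt.sublist (by simp))
  set nw := v + v2 * 2 with hnw
  set s' := PySem.List.insert t ((PySem.List.bisectLeft t nw : Nat) : Int) nw with hs'
  have hs'_len : s'.length = t.length + 1 := by
    have := hs'_perm.length_eq; simpa using this
  have hs'_ne : s' ≠ [] := by
    intro h0; rw [h0] at hs'_len; simp at hs'_len
  have hs'_mul : (LHeap.merge (LHeap.merge l2 r2) (.node nw 1 .nil .nil)).toMul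
      = (s' : Multiset Int) := by
    rw [hheap'_mul, (Multiset.coe_eq_coe.mpr hs'_perm :
      ((s' : Multiset Int)) = ((nw :: t : List Int) : Multiset Int))]
    simp
  have hhead : (LHeap.merge (LHeap.merge l2 r2) (.node nw 1 .nil .nil)).rootD = s'.headI := by
    obtain ⟨c, cs, hcs⟩ := List.exists_cons_of_ne_nil hs'_ne
    rw [hcs] at hs'_mul hs'_sorted
    rw [hcs]
    exact (rootD_eq_head hheap' hs'_mul hs'_sorted).trans (by simp)
  -- unfold one step of each loop
  have hlen2 : (v :: v2 :: t).length = (t.length + 1) + 1 := by simp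
  rw [hlen2, solutionLoopA, solutionLoopB]
  have hgt : ((t.length + 1 + 1 : Nat) : Int) > 1 := by push_cast; omega
  rw [if_pos hgt]
  simp only [LHeap.childL, LHeap.childR, LHeap.rootD.eq_2, hrest]
  rw [← hnw, ← hs', hhead]
  by_cases hK : s'.headI ≥ K
  · simp [hK]
  · simp only [hK, if_false]
    have hrec := ih (t.length + 1) (by simp [← hm]) s'
      (LHeap.merge (LHeap.merge l2 r2) (.node nw 1 .nil .nil)) K (step + 1)
      hs'_len hs'_sorted hheap' hs'_mul
    rw [hs'_len] at hrec
    have hlen1 : ((t.length + 1 + 1 : Nat) : Int) - 1 = ((t.length + 1 : Nat) : Int) := by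
      push_cast; omega
    rw [hlen1]
    exact hrec

-- building the heap: fold invariant
theorem build_inv (xs : List Int) :
    ∀ (acc : LHeap × Int), acc.1.IsHeap →
    ((xs.foldl (fun (p : LHeap × Int) x => (LHeap.merge (.node x 1 .nil .nil) p.1, p.2 + 1)) acc).1.IsHeap ∧
     (xs.foldl (fun (p : LHeap × Int) x => (LHeap.merge (.node x 1 .nil .nil) p.1, p.2 + 1)) acc).1.toMul
        = acc.1.toMul + (xs : Multiset Int) ∧
     (xs.foldl (fun (p : LHeap × Int) x => (LHeap.merge (.node x 1 .nil .nil) p.1, p.2 + 1)) acc).2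
        = acc.2 + xs.length) := by
  induction xs with
  | nil => intro acc h; simpa using h
  | cons y ys ih =>
      intro acc h
      have hh : (LHeap.merge (.node y 1 .nil .nil) acc.1).IsHeap :=
        merge_isHeap _ _ (by simp [LHeap.IsHeap, LHeap.toMul]) h
      obtain ⟨i1, i2, i3⟩ := ih (LHeap.merge (.node y 1 .nil .nil) acc.1, acc.2 + 1) hh
      simp only [List.foldl_cons]
      refine ⟨i1, ?_, ?_⟩
      · rw [i2, merge_toMul, ← Multiset.cons_coe]
        simp only [LHeap.toMul, ← Multiset.singleton_add, add_zero]
        abel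
      · rw [i3, List.length_cons]; push_cast; omega

-- A's loop never returns the starting step count
theorem loopA_ne : ∀ (fuel : Nat) (s : List Int) (K step : Int),
    solutionLoopA fuel s K step = -1 ∨ step < solutionLoopA fuel s K step := by
  intro fuel
  induction fuel with
  | zero => intro s K step; left; rw [solutionLoopA.eq_def]
  | succ n ihn =>
      intro s K step
      match s with
      | [] => left; rfl
      | [a] => left; rfl
      | a :: b :: t =>
        rw [solutionLoopA]
        split
        · right; omega
        · rcases ihn _ K (step + 1) with h | h
          · exact Or.inl h
          · exact Or.inr (by omega)

-- ===== VERDICT (by name: the statement is the Claim_ definition above) =====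
theorem solution_spec : Claim_unchanged_solution := by
  intro scoville K _
  unfold Spec_solution
  intro hnd
  unfold solution solution_alt
  by_cases hne : scoville = []
  · subst hne
    rfl
  · obtain ⟨x, hxmem, hxlt⟩ : ∃ x ∈ scoville, x < K := by
      unfold D_solution at hnd
      push_neg at hnd
      obtain ⟨x, hx1, hx2⟩ := hnd hne
      exact ⟨x, hx1, by omega⟩
    obtain ⟨b1, b2, b3⟩ := build_inv scoville (.nil, 0) (by simp [LHeap.IsHeap])
    set p := scoville.foldl
      (fun (p : LHeap × Int) x => (LHeap.merge (.node x 1 .nil .nil) p.1, p.2 + 1))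
      ((.nil, 0) : LHeap × Int) with hp
    have hs_perm : (PySem.List.sorted scoville (fun x => x) false).Perm scoville :=
      PySem.List.sorted_perm scoville (fun x => x) false
    set s := PySem.List.sorted scoville (fun x => x) false with hsdef
    have hs_sorted : s.Pairwise (· ≤ ·) := by
      have := PySem.List.sorted_pairwise scoville (fun x => x)
      simpa using this
    have hmul : p.1.toMul = (s : Multiset Int) := by
      rw [b2]
      simp [LHeap.toMul]
      exact hs_perm.symm
    have hn : p.2 = (s.length : Int) := by
      rw [b3, hs_perm.length_eq]; simp
    have hs_ne : s ≠ [] := by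
      intro h0
      rw [h0] at hs_perm
      exact hne (List.perm_nil.mp hs_perm.symm)
    obtain ⟨c, cs, hcs⟩ := List.exists_cons_of_ne_nil hs_ne
    · have hroot : p.1.rootD = c := rootD_eq_head b1 (by rw [hmul, hcs]) (hcs ▸ hs_sorted)
      have hclt : c < K := by
        have hxs : x ∈ s := hs_perm.mem_iff.mpr hxmem
        have := sorted_head_le (hcs ▸ hs_sorted) x (hcs ▸ hxs)
        omega
      have hcond : ¬ (p.2 > 0 ∧ p.1.rootD ≥ K) := by
        rintro ⟨-, h2⟩; rw [hroot] at h2; omega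
      rw [if_neg hcond, hn, hcs]
      simp only [Int.toNat_natCast]
      exact sim (c :: cs).length (c :: cs) p.1 K 0 rfl (hcs ▸ hs_sorted) b1 (by rw [hmul, hcs])

theorem solution_changed : Claim_changed_solution := by
  unfold Claim_changed_solution; decide

theorem solution_tight : Claim_exact_solution := by
  intro scoville K _ hd
  obtain ⟨hne, hall⟩ := hd
  obtain ⟨b1, b2, b3⟩ := build_inv scoville (.nil, 0) (by simp [LHeap.IsHeap])
  have halt : solution_alt scoville K = 0 := by
    unfold solution_alt
    rw [if_pos]
    refine ⟨?_, ?_⟩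
    · rw [b3]
      have : scoville.length ≠ 0 := by simpa using hne
      simp; omega
    · have hpne : (scoville.foldl
        (fun (p : LHeap × Int) x => (LHeap.merge (.node x 1 .nil .nil) p.1, p.2 + 1))
        ((.nil, 0) : LHeap × Int)).1 ≠ .nil := by
        intro h0
        rw [h0] at b2
        simp only [LHeap.toMul, zero_add] at b2
        exact hne (by simpa [eq_comm, Multiset.coe_eq_zero] using b2)

      have hmem := rootD_mem hpne
      rw [b2] at hmem
      simp [LHeap.toMul] at hmem
      exact hall _ hmem
  rw [halt]
  unfold solution
  rcases loopA_ne (PySem.List.sorted scoville (fun x => x) false).length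
    (PySem.List.sorted scoville (fun x => x) false) K 0 with h | h
  · omega
  · omega
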